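-- pv_equiv track=rewrite | github.com/MuyanjaKevin/project_legal_ai_assistant | backend/app/services/contract_service.py | process_signature_block
-- ===== SOURCE A (Python) =====
-- def process_signature_block(witness_line, remaining_lines):
--     """Process the signature block section"""
--
--     signature_html = f'<div class="signature-block">'
--     signature_html += f'<p>{witness_line}</p>'
--
--     # Process parties and signature lines
--     parties = []
--     current_party = None
--
--     for line in remaining_lines:
--         if not line.strip():
--             continue
--
--         if line.startswith("By:"):
--             # This is a signature line
--             if current_party:
--                 signature_html += f'<div style="margin-top: 2em;">'
--                 signature_html += f'<div><strong>{current_party}</strong></div>'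
--                 signature_html += f'<div class="signature-line"></div>'
--                 signature_html += f'<div>{line}</div>'
--                 signature_html += f'</div>'
--                 current_party = None
--         elif current_party is None:
--             # This is a party name
--             current_party = line
--
--     signature_html += '</div>'
--     return signature_html
-- ===== SOURCE B (Python) =====
-- def _find_pairs(lines):
--     """Pair each party name with the next 'By:' line, skipping unmatched
--     'By:' lines and extra lines while a party is pending."""
--     i = 0
--     while i < len(lines) and lines[i].startswith("By:"):
--         i += 1
--     if i == len(lines):
--         return []
--     party = lines[i]
--     j = i + 1
--     while j < len(lines) and not lines[j].startswith("By:"):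
--         j += 1
--     if j == len(lines):
--         return []
--     return [(party, lines[j])] + _find_pairs(lines[j + 1:])
--
--
-- def process_signature_block(witness_line, remaining_lines):
--     """Process the signature block section"""
--     lines = [l for l in remaining_lines if l.strip()]
--     body = ''.join(
--         '<div style="margin-top: 2em;">'
--         f'<div><strong>{party}</strong></div>'
--         '<div class="signature-line"></div>'
--         f'<div>{sig}</div>'
--         '</div>'
--         for party, sig in _find_pairs(lines))
--     return f'<div class="signature-block"><p>{witness_line}</p>{body}</div>'
-- ===== Notes on version B (the rewrite author's own statement) =====
-- stated objective: alternative
-- what changed: Replaces A's single state machine that interleaves parsing and HTML emission with two separate phases: a recursive pairing pass (skip unmatched 'By:' lines, pair each party with the next 'By:' line) over the blank-filtered lines, then a join of the rendered blocks.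
import Mathlib
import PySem

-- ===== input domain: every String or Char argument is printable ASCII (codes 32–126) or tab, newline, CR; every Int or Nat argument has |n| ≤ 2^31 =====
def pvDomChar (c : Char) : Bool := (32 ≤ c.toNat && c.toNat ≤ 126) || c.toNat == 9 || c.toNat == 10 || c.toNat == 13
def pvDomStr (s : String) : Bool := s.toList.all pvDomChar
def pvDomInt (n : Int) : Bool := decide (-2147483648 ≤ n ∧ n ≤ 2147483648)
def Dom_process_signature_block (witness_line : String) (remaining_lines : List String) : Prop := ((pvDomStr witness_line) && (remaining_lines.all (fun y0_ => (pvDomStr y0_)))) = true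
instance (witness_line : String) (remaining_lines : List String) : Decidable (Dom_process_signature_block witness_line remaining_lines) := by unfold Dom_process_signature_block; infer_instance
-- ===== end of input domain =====

-- B separates parsing from rendering: it pairs each party with its "By:" line via
-- two skip-scans over the blank-filtered lines, then joins the rendered blocks (objective: alternative).


-- ===== PORT A =====
-- the body of A's for-loop, over the state (signature_html, current_party)
def pvStepA (st : String × Option String) (line : String) : String × Option String :=
  if PySem.Str.strip line = "" then st
  else if PySem.Str.startswith line "By:" then
    match st.2 with
    | some p =>
        -- Python's `if current_party:` — truthy = non-None and non-empty
        if p = "" then st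
        else (st.1 ++ "<div style=\"margin-top: 2em;\">"
                   ++ ("<div><strong>" ++ p ++ "</strong></div>")
                   ++ "<div class=\"signature-line\"></div>"
                   ++ ("<div>" ++ line ++ "</div>")
                   ++ "</div>", none)
    | none => st
  else
    match st.2 with
    | none => (st.1, some line)
    | some _ => st

def process_signature_block (witness_line : String) (remaining_lines : List String) : String :=
  let signature_html := "<div class=\"signature-block\">" ++ ("<p>" ++ witness_line ++ "</p>")
  let st := remaining_lines.foldl pvStepA (signature_html, none)
  st.1 ++ "</div>"

-- ===== PORT B =====
-- _find_pairs: skip unmatched "By:" lines until a party name …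
mutual
def pvSkipBy : List String → List (String × String)
  | [] => []
  | l :: ls => if PySem.Str.startswith l "By:" then pvSkipBy ls else pvSeekBy l ls
-- … then skip until the next "By:" line, pair it with the party, continue after it
def pvSeekBy (party : String) : List String → List (String × String)
  | [] => []
  | l :: ls => if PySem.Str.startswith l "By:" then (party, l) :: pvSkipBy ls else pvSeekBy party ls
end

-- one rendered block (the adjacent f-string pieces of Source B)
def pvBlock (party sig : String) : String :=
  "<div style=\"margin-top: 2em;\">"
    ++ ("<div><strong>" ++ party ++ "</strong></div>")
    ++ "<div class=\"signature-line\"></div>"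
    ++ ("<div>" ++ sig ++ "</div>")
    ++ "</div>"

def process_signature_block_alt (witness_line : String) (remaining_lines : List String) : String :=
  let lines := remaining_lines.filter (fun l => PySem.Str.strip l != "")
  let body := PySem.Str.join "" ((pvSkipBy lines).map (fun pr => pvBlock pr.1 pr.2))
  "<div class=\"signature-block\"><p>" ++ witness_line ++ ("</p>" ++ body ++ "</div>")

-- ===== PRECONDITION & SPEC =====
def Spec_process_signature_block (witness_line : String) (remaining_lines : List String) (out : String) : Prop := out = process_signature_block_alt witness_line remaining_lines
instance (witness_line : String) (remaining_lines : List String) (out : String) : Decidable (Spec_process_signature_block witness_line remaining_lines out) := by unfold Spec_process_signature_block; infer_instance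

-- ===== CLAIM (what is proved, stated in full; the proofs are below) =====
def Claim_equal_process_signature_block : Prop := ∀ (witness_line : String) (remaining_lines : List String), Dom_process_signature_block witness_line remaining_lines → Spec_process_signature_block witness_line remaining_lines (process_signature_block witness_line remaining_lines)

-- ===== LEMMAS AND PROOFS =====

theorem pv_join_cons (x : String) (xs : List String) :
    PySem.Str.join "" (x :: xs) = x ++ PySem.Str.join "" xs := by
  apply String.toList_injective
  simp [PySem.Chars.join]
  cases xs <;> simp [List.intercalate]

-- rendering of the extracted pair list
def pvRender (ps : List (String × String)) : String :=
  PySem.Str.join "" (ps.map (fun pr => pvBlock pr.1 pr.2))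

theorem pvRender_nil : pvRender [] = "" := rfl

theorem pvRender_cons (pr : String × String) (ps : List (String × String)) :
    pvRender (pr :: ps) = pvBlock pr.1 pr.2 ++ pvRender ps := by
  simp [pvRender, pv_join_cons]

-- one step lemma per branch of A's loop body
theorem pv_stepA_blank (st : String × Option String) (l : String)
    (hb : PySem.Str.strip l = "") : pvStepA st l = st := by
  unfold pvStepA; rw [if_pos hb]

theorem pv_stepA_by_none (h l : String) (hb : ¬ PySem.Str.strip l = "")
    (hs : PySem.Str.startswith l "By:" = true) : pvStepA (h, none) l = (h, none) := by
  unfold pvStepA; rw [if_neg hb, if_pos hs]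

theorem pv_stepA_by_some (h p l : String) (hb : ¬ PySem.Str.strip l = "")
    (hs : PySem.Str.startswith l "By:" = true) (hp : p ≠ "") :
    pvStepA (h, some p) l = (h ++ pvBlock p l, none) := by
  unfold pvStepA pvBlock; rw [if_neg hb, if_pos hs]
  simp [hp, String.append_assoc]

theorem pv_stepA_other_none (h l : String) (hb : ¬ PySem.Str.strip l = "")
    (hs : ¬ PySem.Str.startswith l "By:" = true) : pvStepA (h, none) l = (h, some l) := by
  unfold pvStepA; rw [if_neg hb, if_neg hs]

theorem pv_stepA_other_some (h p l : String) (hb : ¬ PySem.Str.strip l = "")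
    (hs : ¬ PySem.Str.startswith l "By:" = true) : pvStepA (h, some p) l = (h, some p) := by
  unfold pvStepA; rw [if_neg hb, if_neg hs]

-- loop invariant: A's fold, from either machine state, appends exactly the
-- rendering of the pairs B extracts from the blank-filtered remaining lines
theorem pv_inv (ls : List String) :
    (∀ h : String, (ls.foldl pvStepA (h, none)).1
        = h ++ pvRender (pvSkipBy (ls.filter (fun l => PySem.Str.strip l != "")))) ∧
    (∀ (h p : String), p ≠ "" → (ls.foldl pvStepA (h, some p)).1
        = h ++ pvRender (pvSeekBy p (ls.filter (fun l => PySem.Str.strip l != "")))) := by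
  induction ls with
  | nil =>
      constructor <;> intros <;>
        simp [List.foldl, pvRender_nil, pvSkipBy, pvSeekBy]
  | cons l ls ih =>
      obtain ⟨ih₀, ih₁⟩ := ih
      by_cases hb : PySem.Str.strip l = ""
      · have hf : List.filter (fun l => PySem.Str.strip l != "") (l :: ls)
            = List.filter (fun l => PySem.Str.strip l != "") ls := by
          simp [hb]
        refine ⟨fun h => ?_, fun h p hp => ?_⟩
        · rw [List.foldl_cons, pv_stepA_blank _ _ hb, hf]
          exact ih₀ h
        · rw [List.foldl_cons, pv_stepA_blank _ _ hb, hf]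
          exact ih₁ h p hp
      · have hf : List.filter (fun l => PySem.Str.strip l != "") (l :: ls)
            = l :: List.filter (fun l => PySem.Str.strip l != "") ls := by
          simp [hb]
        have hl : l ≠ "" := by intro h; exact hb (by rw [h]; rfl)
        by_cases hs : PySem.Str.startswith l "By:" = true
        · refine ⟨fun h => ?_, fun h p hp => ?_⟩
          · rw [List.foldl_cons, pv_stepA_by_none h l hb hs, hf,
                pvSkipBy, if_pos hs]
            exact ih₀ h
          · rw [List.foldl_cons, pv_stepA_by_some h p l hb hs hp, ih₀,
                hf, pvSeekBy, if_pos hs, pvRender_cons,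
                String.append_assoc]
        · refine ⟨fun h => ?_, fun h p hp => ?_⟩
          · rw [List.foldl_cons, pv_stepA_other_none h l hb hs, hf,
                pvSkipBy, if_neg hs]
            exact ih₁ h l hl
          · rw [List.foldl_cons, pv_stepA_other_some h p l hb hs, hf,
                pvSeekBy, if_neg hs]
            exact ih₁ h p hp

-- ===== VERDICT (by name: the statement is the Claim_ definition above) =====
theorem process_signature_block_spec : Claim_equal_process_signature_block := by
  intro w rs _
  have lit : ("<div class=\"signature-block\"><p>" : String)
      = "<div class=\"signature-block\">" ++ "<p>" := rfl
  simp only [Spec_process_signature_block, process_signature_block,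
             process_signature_block_alt]
  rw [(pv_inv rs).1, lit]
  simp only [pvRender, String.append_assoc]
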